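-- pv_equiv track=rewrite | github.com/MuhammadDevX/Search-Engine-Backend | add_json.py | _count_field_occurrences
-- ===== SOURCE A (Python) =====
-- from typing import Dict, Any, Optional
-- from collections import defaultdict
--
-- def _count_field_occurrences(positions: list[int], field_lengths: Dict[str, int]) -> Dict[str, int]:
--     field_counts = defaultdict(int)
--     title_end = field_lengths['title']
--     text_end = title_end + field_lengths['text']
--
--     for pos in positions:
--         if pos < title_end:
--             field_counts['title'] += 1
--         elif pos < text_end:
--             field_counts['text'] += 1
--         else:
--             field_counts['tags'] += 1
--
--     return dict(field_counts)
-- ===== SOURCE B (Python) =====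
-- def _count_field_occurrences(positions, field_lengths):
--     title_end = field_lengths['title']
--     text_end = title_end + field_lengths['text']
--
--     def cat(p):
--         return 'title' if p < title_end else 'text' if p < text_end else 'tags'
--
--     order = list(dict.fromkeys(map(cat, positions)))
--     return {k: sum(1 for p in positions if cat(p) == k) for k in order}
-- ===== Notes on version B (the rewrite author's own statement) =====
-- stated objective: alternative
-- what changed: Replaces the single classifying pass that mutates a defaultdict with an order-computation via dict.fromkeys over the category of each position plus one filtered-count comprehension per occurring field, so no mutable counter dict is maintained.
import Mathlib
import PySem

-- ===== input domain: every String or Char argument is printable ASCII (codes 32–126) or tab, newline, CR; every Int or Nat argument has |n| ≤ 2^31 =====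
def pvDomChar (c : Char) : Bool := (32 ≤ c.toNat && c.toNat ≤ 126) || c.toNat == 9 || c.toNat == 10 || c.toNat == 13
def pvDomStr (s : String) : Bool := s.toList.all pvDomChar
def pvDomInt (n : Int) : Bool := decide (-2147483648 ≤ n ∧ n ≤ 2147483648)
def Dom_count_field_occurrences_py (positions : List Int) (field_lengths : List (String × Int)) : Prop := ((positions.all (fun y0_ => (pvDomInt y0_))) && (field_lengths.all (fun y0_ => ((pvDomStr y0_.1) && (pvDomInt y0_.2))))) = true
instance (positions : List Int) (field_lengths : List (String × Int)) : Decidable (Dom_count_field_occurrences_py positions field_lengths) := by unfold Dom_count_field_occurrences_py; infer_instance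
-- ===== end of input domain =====

-- B replaces A's single classifying pass over a mutable defaultdict by computing the key order
-- with an ordered dedup of the positions' categories and one filtered count per occurring field.

-- ===== PORT A =====
def count_field_occurrences_py (positions : List Int) (field_lengths : List (String × Int)) : List (String × Int) :=
  let d := PySem.Dict.ofList field_lengths
  match d.get? "title", d.get? "text" with
  | some t, some x =>
    let title_end := t
    let text_end := title_end + x
    let fc := positions.foldl (fun fc pos =>
        if pos < title_end then fc.modify "title" 0 (· + 1)
        else if pos < text_end then fc.modify "text" 0 (· + 1)
        else fc.modify "tags" 0 (· + 1)) (PySem.Dict.empty)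
    fc.items
  | _, _ => []  -- KeyError: excluded by Pre_

-- ===== PORT B =====
def count_field_occurrences_py_alt (positions : List Int) (field_lengths : List (String × Int)) : List (String × Int) :=
  let d := PySem.Dict.ofList field_lengths
  match d.get? "title" with
  | none => []  -- KeyError: excluded by Pre_
  | some t =>
    match d.get? "text" with
    | none => []  -- KeyError: excluded by Pre_
    | some x =>
      let cat : Int → String := fun p => if p < t then "title" else if p < t + x then "text" else "tags"
      let order := PySem.List.dedup (positions.map cat)
      order.map (fun k => (k, (positions.countP (fun p => cat p == k) : Int)))

-- ===== PRECONDITION & SPEC =====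
-- Pre_ excludes exactly the inputs where Python A raises KeyError ('title' or 'text' missing).
def Pre_count_field_occurrences_py (positions : List Int) (field_lengths : List (String × Int)) : Prop :=
  (PySem.Dict.ofList field_lengths).contains "title" = true ∧
  (PySem.Dict.ofList field_lengths).contains "text" = true
instance (positions : List Int) (field_lengths : List (String × Int)) : Decidable (Pre_count_field_occurrences_py positions field_lengths) := by unfold Pre_count_field_occurrences_py; infer_instance
def pvWitness_count_field_occurrences_py : List Int × (List (String × Int)) := ([0, 3, 9], [("title", 2), ("text", 5)])

def Spec_count_field_occurrences_py (positions : List Int) (field_lengths : List (String × Int)) (out : List (String × Int)) : Prop := out = count_field_occurrences_py_alt positions field_lengths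
instance (positions : List Int) (field_lengths : List (String × Int)) (out : List (String × Int)) : Decidable (Spec_count_field_occurrences_py positions field_lengths out) := by unfold Spec_count_field_occurrences_py; infer_instance

-- ===== CLAIM (what is proved, stated in full; the proofs are below) =====
def Claim_equal_count_field_occurrences_py : Prop := ∀ (positions : List Int) (field_lengths : List (String × Int)), Dom_count_field_occurrences_py positions field_lengths → Pre_count_field_occurrences_py positions field_lengths → Spec_count_field_occurrences_py positions field_lengths (count_field_occurrences_py positions field_lengths)

-- ===== LEMMAS AND PROOFS =====

theorem pv_main (positions : List Int) (t x : Int) :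
    (positions.foldl (fun fc pos =>
        if pos < t then fc.modify "title" 0 (· + 1)
        else if pos < t + x then fc.modify "text" 0 (· + 1)
        else fc.modify "tags" 0 (· + 1)) (PySem.Dict.empty : PySem.Dict String Int)).items
    = (PySem.List.dedup (positions.map (fun p => if p < t then "title" else if p < t + x then "text" else "tags"))).map
        (fun k => (k, (positions.countP (fun p => (if p < t then "title" else if p < t + x then "text" else "tags") == k) : Int))) := by
  have h1 : positions.foldl (fun fc pos =>
        if pos < t then fc.modify "title" 0 (· + 1)
        else if pos < t + x then fc.modify "text" 0 (· + 1)
        else fc.modify "tags" 0 (· + 1)) (PySem.Dict.empty : PySem.Dict String Int)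
      = PySem.Dict.counter (positions.map (fun p => if p < t then "title" else if p < t + x then "text" else "tags")) := by
    rw [PySem.Dict.counter_eq_foldl, List.foldl_map]
    apply PySem.List.foldl_congr_mem
    intro acc p _
    split_ifs <;> rfl
  rw [h1, PySem.Dict.items_counter, PySem.List.dedup_eq_ofList]
  refine List.map_congr_left (fun k _ => ?_)
  simp only [List.count, List.countP_map]
  rfl

theorem count_field_occurrences_py_spec : Claim_equal_count_field_occurrences_py := by
  intro positions field_lengths _ hpre
  obtain ⟨ht, hx⟩ := hpre
  rw [PySem.Dict.contains_eq_isSome_get?] at ht hx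
  unfold Spec_count_field_occurrences_py count_field_occurrences_py count_field_occurrences_py_alt
  obtain ⟨t, het⟩ := Option.isSome_iff_exists.mp ht
  obtain ⟨x, hex⟩ := Option.isSome_iff_exists.mp hx
  simp only [het, hex]
  exact pv_main positions t x
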